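-- pv_equiv track=rewrite | github.com/Shwetha-75/Leet-Code-problems | FindArrayCanSorted.py | findArrayCanBeSorted
-- ===== SOURCE A (Python) =====
-- def findArrayCanBeSorted(array:list):
--     bitCount=bin(array[0]).count("1")
--     prevMax=-1
--     curMax=array[0]
--     for i in range(1,len(array)):
--         if bin(array[i]).count("1")!=bitCount:
--             prevMax=max(prevMax,curMax)
--             curMax=array[i]
--             bitCount=bin(array[i]).count("1")
--         else:
--             curMax=max(curMax,array[i])
--         if prevMax!=-1 and array[i]<prevMax:
--             return False
--     return True
-- ===== SOURCE B (Python) =====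
-- def findArrayCanBeSorted(array: list):
--     # Pass 1: partition into maximal consecutive runs of equal popcount,
--     # recording (min, max) per run.
--     runs = []
--     cur = None  # (popcount, lo, hi) of the run being built
--     for x in array:
--         k = bin(x).count("1")
--         if cur is not None and k == cur[0]:
--             cur = (k, min(cur[1], x), max(cur[2], x))
--         else:
--             if cur is not None:
--                 runs.append((cur[1], cur[2]))
--             cur = (k, x, x)
--     if cur is not None:
--         runs.append((cur[1], cur[2]))
--     # Pass 2: sortable iff each run's max is <= the next run's min.
--     for (_, hi), (lo, _) in zip(runs, runs[1:]):
--         if hi > lo: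
--             return False
--     return True
-- ===== Notes on version B (the rewrite author's own statement) =====
-- stated objective: alternative
-- what changed: B first partitions the array into maximal equal-popcount runs recording each run's (min, max), then checks adjacent runs' max<=min in a second pass, instead of A's single pass tracking a -1-sentinel previous maximum with an early return.
-- intended difference: On arrays where every out-of-order pair across runs involves a closed-run maximum that is negative (e.g. [-1, 3, -5]), A's -1 sentinel for 'no previous group' masks the check and A wrongly returns True, while B returns False, which is the intended answer since such arrays cannot be sorted by the allowed swaps. — e.g. on findArrayCanBeSorted([-1, 3, -5]): A returns true, B returns false
import Mathlib
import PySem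

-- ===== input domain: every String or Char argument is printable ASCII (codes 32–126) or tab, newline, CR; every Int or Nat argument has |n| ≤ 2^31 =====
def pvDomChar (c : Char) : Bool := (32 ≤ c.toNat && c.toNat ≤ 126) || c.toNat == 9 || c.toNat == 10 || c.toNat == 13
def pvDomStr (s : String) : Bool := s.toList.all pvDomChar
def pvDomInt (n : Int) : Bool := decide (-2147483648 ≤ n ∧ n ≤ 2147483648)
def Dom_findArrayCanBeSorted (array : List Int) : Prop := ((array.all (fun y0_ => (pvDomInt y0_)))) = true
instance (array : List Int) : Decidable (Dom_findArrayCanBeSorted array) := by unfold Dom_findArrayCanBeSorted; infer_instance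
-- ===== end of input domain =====

-- B partitions the array into maximal equal-popcount runs with their (min, max) and then checks
-- adjacent runs in a second pass, instead of A's one-pass -1-sentinel prevMax tracking; A's sentinel
-- wrongly reports True when every cross-run inversion is against a negative closed-run maximum (D_ below).

-- bin(x).count("1") for a Python int: popcount of |x| (fuel-structured so the kernel can evaluate it)
def pcAux : Nat → Nat → Nat
  | 0, _ => 0
  | f + 1, n => if n = 0 then 0 else pcAux f (n / 2) + n % 2

def pyPopcount (x : Int) : Nat := pcAux x.natAbs x.natAbs

-- ===== PORT A =====
-- the for-loop of A over the remaining elements, state (bitCount, prevMax, curMax)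
def goA (bc : Nat) (pm cm : Int) : List Int → Bool
  | [] => true
  | x :: xs =>
    if pyPopcount x ≠ bc then
      if max pm cm ≠ -1 ∧ x < max pm cm then false
      else goA (pyPopcount x) (max pm cm) x xs
    else
      if pm ≠ -1 ∧ x < pm then false
      else goA bc pm (max cm x) xs

def findArrayCanBeSorted (array : List Int) : Bool :=
  match array with
  | [] => true  -- Python raises IndexError here (indexing the first element); excluded by Pre_
  | a :: rest => goA (pyPopcount a) (-1) a rest

-- ===== PORT B =====
-- pass 1: fold building the list of closed runs (lo, hi) plus the run under construction
def stepB (st : List (Int × Int) × Option (Nat × Int × Int)) (x : Int) :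
    List (Int × Int) × Option (Nat × Int × Int) :=
  let k := pyPopcount x
  match st with
  | (runs, none) => (runs, some (k, x, x))
  | (runs, some (pk, lo, hi)) =>
    if k = pk then (runs, some (pk, min lo x, max hi x))
    else (runs ++ [(lo, hi)], some (k, x, x))

def flushB (st : List (Int × Int) × Option (Nat × Int × Int)) : List (Int × Int) :=
  match st with
  | (runs, none) => runs
  | (runs, some (_, lo, hi)) => runs ++ [(lo, hi)]

-- pass 2: every run's max ≤ the next run's min
def chkAdj (runs : List (Int × Int)) : Bool :=
  (runs.zip runs.tail).all (fun pr => !(decide (pr.1.2 > pr.2.1)))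

def findArrayCanBeSorted_alt (array : List Int) : Bool :=
  chkAdj (flushB (array.foldl stepB ([], none)))

-- ===== PRECONDITION & SPEC =====
-- Pre_ excludes only the empty list, on which A raises IndexError reading the first element.
def Pre_findArrayCanBeSorted (array : List Int) : Prop := array ≠ []
instance (array : List Int) : Decidable (Pre_findArrayCanBeSorted array) := by
  unfold Pre_findArrayCanBeSorted; infer_instance

def pvWitness_findArrayCanBeSorted : List Int := [3, 1, 2]

-- helper for D_: across some adjacent popcount change at position k, the minimum of the elements
-- after it lies below the maximum of the elements up to it (s = true: below a nonnegative maximum)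
abbrev VI (ar : List Int) (s : Bool) : Prop :=
  ¬ List.IsChain LE.le ar ∧
  ∃ k < ar.length - 1,
    pyPopcount ar[k]! ≠ pyPopcount ar.tail[k]! ∧
    let m := (ar.drop (k + 1)).min?.getD 0
    let q := (ar.take (k + 1)).foldl max m
    m < q ∧ (s → 0 ≤ q)

-- On arrays whose every cross-run inversion is against a negative earlier element, A's -1 sentinel
-- masks its check and A returns True although the array is not sortable; B returns False, the intended answer.
def D_findArrayCanBeSorted (array : List Int) : Prop := VI array false ∧ ¬ VI array true
instance (array : List Int) : Decidable (D_findArrayCanBeSorted array) := by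
  unfold D_findArrayCanBeSorted; infer_instance

def Spec_findArrayCanBeSorted (array : List Int) (out : Bool) : Prop :=
  ¬ D_findArrayCanBeSorted array → out = findArrayCanBeSorted_alt array
instance (array : List Int) (out : Bool) : Decidable (Spec_findArrayCanBeSorted array out) := by
  unfold Spec_findArrayCanBeSorted; infer_instance

def pvDiffWitness_findArrayCanBeSorted : List Int := [-1, 3, -5]
def pvDiffWitnessOut_findArrayCanBeSorted : Bool × Bool := (true, false)

-- ===== CLAIM (what is proved, stated in full; the proofs are below) =====
def Claim_unchanged_findArrayCanBeSorted : Prop := ∀ (array : List Int), Dom_findArrayCanBeSorted array → Pre_findArrayCanBeSorted array → Spec_findArrayCanBeSorted array (findArrayCanBeSorted array)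
def Claim_changed_findArrayCanBeSorted : Prop := Dom_findArrayCanBeSorted (pvDiffWitness_findArrayCanBeSorted) ∧ Pre_findArrayCanBeSorted (pvDiffWitness_findArrayCanBeSorted) ∧ D_findArrayCanBeSorted (pvDiffWitness_findArrayCanBeSorted) ∧ findArrayCanBeSorted (pvDiffWitness_findArrayCanBeSorted) = pvDiffWitnessOut_findArrayCanBeSorted.1 ∧ findArrayCanBeSorted_alt (pvDiffWitness_findArrayCanBeSorted) = pvDiffWitnessOut_findArrayCanBeSorted.2 ∧ pvDiffWitnessOut_findArrayCanBeSorted.1 ≠ pvDiffWitnessOut_findArrayCanBeSorted.2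
def Claim_exact_findArrayCanBeSorted : Prop := ∀ (array : List Int), Dom_findArrayCanBeSorted array → Pre_findArrayCanBeSorted array → D_findArrayCanBeSorted array → findArrayCanBeSorted array ≠ findArrayCanBeSorted_alt array

-- ===== LEMMAS AND PROOFS =====

-- proof-side view: keyed list (popcount, value)
def keyedOf (ar : List Int) : List (Nat × Int) := ar.map (fun x => (pyPopcount x, x))
def kA (kv : List (Nat × Int)) (i : Nat) : Nat := (kv.getD i (0, 0)).1
def vA (kv : List (Nat × Int)) (i : Nat) : Int := (kv.getD i (0, 0)).2
-- a popcount change strictly between positions j and i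
def Cut (kv : List (Nat × Int)) (j i : Nat) : Prop := ∃ k, k < i ∧ j ≤ k ∧ kA kv k ≠ kA kv (k + 1)
-- cross-run inversion; sgn = true additionally demands the earlier element nonnegative
def GP (sgn : Bool) (kv : List (Nat × Int)) : Prop :=
  ∃ i, i < kv.length ∧ ∃ j, j < i ∧ Cut kv j i ∧ (sgn = true → 0 ≤ vA kv j) ∧ vA kv i < vA kv j
-- head-based inversion: some element of kv in a later run than the pseudo-head p lies below p.2
def HG (sgn : Bool) (p : Nat × Int) (kv : List (Nat × Int)) : Prop :=
  ∃ i, i < kv.length ∧ Cut (p :: kv) 0 (i + 1) ∧ (sgn = true → 0 ≤ p.2) ∧ vA kv i < p.2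
-- prevMax-based violation at a non-seed position
def PP (pm : Int) (kv : List (Nat × Int)) : Prop :=
  0 ≤ pm ∧ ∃ i, 1 ≤ i ∧ i < kv.length ∧ vA kv i < pm
def PV (pm : Int) (kv : List (Nat × Int)) : Prop := PP pm kv ∨ GP true kv

theorem kA_cons_zero (p : Nat × Int) (kv : List (Nat × Int)) : kA (p :: kv) 0 = p.1 := rfl
theorem kA_cons_succ (p : Nat × Int) (kv : List (Nat × Int)) (i : Nat) : kA (p :: kv) (i + 1) = kA kv i := rfl
theorem vA_cons_zero (p : Nat × Int) (kv : List (Nat × Int)) : vA (p :: kv) 0 = p.2 := rfl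
theorem vA_cons_succ (p : Nat × Int) (kv : List (Nat × Int)) (i : Nat) : vA (p :: kv) (i + 1) = vA kv i := rfl

theorem cut_succ (p : Nat × Int) (kv : List (Nat × Int)) (j i : Nat) :
    Cut (p :: kv) (j + 1) (i + 1) ↔ Cut kv j i := by
  constructor
  · rintro ⟨k, hki, hjk, hne⟩
    match k, hjk with
    | k + 1, hjk =>
      exact ⟨k, by omega, by omega, by simpa [kA_cons_succ] using hne⟩
  · rintro ⟨k, hki, hjk, hne⟩
    exact ⟨k + 1, by omega, by omega, by simpa [kA_cons_succ] using hne⟩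

theorem cut_zero_succ (p : Nat × Int) (kv : List (Nat × Int)) (i : Nat) :
    Cut (p :: kv) 0 (i + 1) ↔ (p.1 ≠ kA kv 0 ∨ Cut kv 0 i) := by
  constructor
  · rintro ⟨k, hki, -, hne⟩
    match k with
    | 0 => exact Or.inl (by simpa [kA_cons_zero, kA_cons_succ] using hne)
    | k + 1 => exact Or.inr ⟨k, by omega, by omega, by simpa [kA_cons_succ] using hne⟩
  · rintro (hne | ⟨k, hki, -, hne⟩)
    · exact ⟨0, by omega, by omega, by simpa [kA_cons_zero, kA_cons_succ] using hne⟩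
    · exact ⟨k + 1, by omega, by omega, by simpa [kA_cons_succ] using hne⟩

theorem cut_head_val (k : Nat) (c x : Int) (tl : List (Nat × Int)) (j i : Nat) :
    Cut ((k, c) :: tl) j i ↔ Cut ((k, x) :: tl) j i := by
  have hk : ∀ m, kA ((k, c) :: tl) m = kA ((k, x) :: tl) m := by
    intro m; cases m <;> simp [kA_cons_zero, kA_cons_succ]
  unfold Cut
  exact exists_congr fun m => by rw [hk m, hk (m + 1)]

theorem GP_cons (s : Bool) (p : Nat × Int) (kv : List (Nat × Int)) :
    GP s (p :: kv) ↔ HG s p kv ∨ GP s kv := by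
  constructor
  · rintro ⟨i, hi, j, hji, hcut, hs, hlt⟩
    match j, i with
    | 0, i + 1 =>
      exact Or.inl ⟨i, by simpa using hi, hcut, by simpa [vA_cons_zero] using hs,
        by simpa [vA_cons_zero, vA_cons_succ] using hlt⟩
    | j + 1, i + 1 =>
      exact Or.inr ⟨i, by simpa using hi, j, by omega, (cut_succ p kv j i).mp hcut,
        by simpa [vA_cons_succ] using hs, by simpa [vA_cons_succ] using hlt⟩
  · rintro (⟨i, hi, hcut, hs, hlt⟩ | ⟨i, hi, j, hji, hcut, hs, hlt⟩)
    · exact ⟨i + 1, by simpa using hi, 0, by omega, hcut,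
        by simpa [vA_cons_zero] using hs, by simpa [vA_cons_zero, vA_cons_succ] using hlt⟩
    · exact ⟨i + 1, by simpa using hi, j + 1, by omega, (cut_succ p kv j i).mpr hcut,
        by simpa [vA_cons_succ] using hs, by simpa [vA_cons_succ] using hlt⟩

theorem HG_shift (s : Bool) (k : Nat) (c x : Int) (tl : List (Nat × Int)) :
    HG s (k, c) ((k, x) :: tl) ↔ HG s (k, c) tl := by
  constructor
  · rintro ⟨i, hi, hcut, hs, hlt⟩
    match i with
    | 0 =>
      rcases (cut_zero_succ _ _ 0).mp hcut with h | ⟨m, hm, -, -⟩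
      · simp [kA_cons_zero] at h
      · omega
    | i + 1 =>
      rcases (cut_zero_succ _ _ (i + 1)).mp hcut with h | hcut'
      · simp [kA_cons_zero] at h
      · refine ⟨i, by simpa using hi, ?_, hs, by simpa [vA_cons_succ] using hlt⟩
        exact (cut_head_val k c x tl 0 (i + 1)).mpr hcut'
  · rintro ⟨i, hi, hcut, hs, hlt⟩
    refine ⟨i + 1, by simpa using hi, ?_, hs, by simpa [vA_cons_succ] using hlt⟩
    exact (cut_zero_succ _ _ (i + 1)).mpr
      (Or.inr ((cut_head_val k x c tl 0 (i + 1)).mpr hcut))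

theorem HG_max (s : Bool) (k : Nat) (c x : Int) (tl : List (Nat × Int)) :
    HG s (k, c) tl ∨ HG s (k, x) tl ↔ HG s (k, max c x) tl := by
  constructor
  · rintro (⟨i, hi, hcut, hs, hlt⟩ | ⟨i, hi, hcut, hs, hlt⟩)
    · exact ⟨i, hi, (cut_head_val k (max c x) c tl 0 (i + 1)).mpr hcut,
        fun h => le_trans (hs h) (le_max_left c x), lt_of_lt_of_le hlt (le_max_left c x)⟩
    · exact ⟨i, hi, (cut_head_val k (max c x) x tl 0 (i + 1)).mpr hcut,
        fun h => le_trans (hs h) (le_max_right c x), lt_of_lt_of_le hlt (le_max_right c x)⟩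
  · rintro ⟨i, hi, hcut, hs, hlt⟩
    rcases max_choice c x with hm | hm
    · exact Or.inl ⟨i, hi, (cut_head_val k c (max c x) tl 0 (i + 1)).mpr hcut,
        fun h => hm ▸ hs h, hm ▸ hlt⟩
    · exact Or.inr ⟨i, hi, (cut_head_val k x (max c x) tl 0 (i + 1)).mpr hcut,
        fun h => hm ▸ hs h, hm ▸ hlt⟩

theorem HG_diff (s : Bool) (k k' : Nat) (c x : Int) (tl : List (Nat × Int)) (h : k ≠ k') :
    HG s (k, c) ((k', x) :: tl) ↔
      (s = true → 0 ≤ c) ∧ ∃ i, i < ((k', x) :: tl).length ∧ vA ((k', x) :: tl) i < c := by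
  constructor
  · rintro ⟨i, hi, hcut, hs, hlt⟩
    exact ⟨hs, i, hi, hlt⟩
  · rintro ⟨hs, i, hi, hlt⟩
    refine ⟨i, hi, ⟨0, by omega, by omega, ?_⟩, hs, hlt⟩
    simpa [kA_cons_zero, kA_cons_succ] using h

theorem PP_tail (pm : Int) (s : Nat × Int) (kv : List (Nat × Int)) :
    PP pm (s :: kv) ↔ 0 ≤ pm ∧ ∃ i, i < kv.length ∧ vA kv i < pm := by
  unfold PP
  constructor
  · rintro ⟨h0, i, h1, hi, hlt⟩
    match i, h1 with
    | i + 1, _ => exact ⟨h0, i, by simpa using hi, by simpa [vA_cons_succ] using hlt⟩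
  · rintro ⟨h0, i, hi, hlt⟩
    exact ⟨h0, i + 1, by omega, by simpa using hi, by simpa [vA_cons_succ] using hlt⟩

theorem PP_max (pm cm : Int) (kv : List (Nat × Int)) :
    PP (max pm cm) kv ↔ PP pm kv ∨ PP cm kv := by
  unfold PP
  constructor
  · rintro ⟨h0, i, h1, hi, hlt⟩
    rcases max_choice pm cm with hm | hm
    · exact Or.inl ⟨by omega, i, h1, hi, by omega⟩
    · exact Or.inr ⟨by omega, i, h1, hi, by omega⟩
  · rintro (⟨h0, i, h1, hi, hlt⟩ | ⟨h0, i, h1, hi, hlt⟩)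
    · exact ⟨by omega, i, h1, hi, by omega⟩
    · exact ⟨by omega, i, h1, hi, by omega⟩

-- the chain argument: an inversion against the head may be pushed into the first run or becomes a GP
theorem chain_first_run (rest : List (Nat × Int)) (c : Int) (hne : rest ≠ []) :
    ((∃ i, i < rest.length ∧ vA rest i < c) ∨ GP false rest) ↔
      ((∃ i, i < rest.length ∧ ¬ Cut rest 0 i ∧ vA rest i < c) ∨ GP false rest) := by
  constructor
  · rintro (⟨i, hi, hlt⟩ | hgp)
    · by_cases hcut : Cut rest 0 i
      · by_cases h0 : vA rest 0 < c
        · exact Or.inl ⟨0, by cases rest with | nil => exact absurd rfl hne | cons a t => simp,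
            by rintro ⟨m, hm, -, -⟩; omega, h0⟩
        · have hipos : 0 < i := by rcases hcut with ⟨m, hm, -, -⟩; omega
          exact Or.inr ⟨i, hi, 0, hipos, hcut, by simp, by omega⟩
      · exact Or.inl ⟨i, hi, hcut, hlt⟩
    · exact Or.inr hgp
  · rintro (⟨i, hi, -, hlt⟩ | hgp)
    · exact Or.inl ⟨i, hi, hlt⟩
    · exact Or.inr hgp

-- min of the maximal leading equal-popcount run (pass-1 helper semantics)
def runMin (k : Nat) (acc : Int) : List Int → Int
  | [] => acc
  | x :: xs => if pyPopcount x = k then runMin k (min acc x) xs else acc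

def mkRuns (k : Nat) (lo hi : Int) : List Int → List (Int × Int)
  | [] => [(lo, hi)]
  | x :: xs =>
    if pyPopcount x = k then mkRuns k (min lo x) (max hi x) xs
    else (lo, hi) :: mkRuns (pyPopcount x) x x xs

theorem mkRuns_ne_nil (l : List Int) (k : Nat) (lo hi : Int) : mkRuns k lo hi l ≠ [] := by
  induction l generalizing k lo hi with
  | nil => simp [mkRuns]
  | cons x xs ih =>
    unfold mkRuns
    split
    · exact ih _ _ _
    · simp

theorem mkRuns_head_fst (l : List Int) (k : Nat) (lo hi : Int) :
    ((mkRuns k lo hi l).headD (0, 0)).1 = runMin k lo l := by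
  induction l generalizing lo hi with
  | nil => simp [mkRuns, runMin]
  | cons x xs ih =>
    unfold mkRuns runMin
    split
    · exact ih _ _
    · simp

theorem foldB_flush (l : List Int) (runs : List (Int × Int)) (k : Nat) (lo hi : Int) :
    flushB (l.foldl stepB (runs, some (k, lo, hi))) = runs ++ mkRuns k lo hi l := by
  induction l generalizing runs k lo hi with
  | nil => simp [flushB, mkRuns]
  | cons x xs ih =>
    simp only [List.foldl_cons, stepB, mkRuns]
    by_cases h : pyPopcount x = k
    · simp only [if_pos h]; rw [ih]
    · simp only [if_neg h]; rw [ih, List.append_assoc]; simp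

theorem chkAdj_cons (r s : Int × Int) (t : List (Int × Int)) :
    (chkAdj (r :: s :: t) = false ↔ s.1 < r.2 ∨ chkAdj (s :: t) = false) := by
  simp only [chkAdj, List.zip, List.tail_cons, List.zipWith_cons_cons, List.all_cons,
    Bool.and_eq_false_iff, Bool.not_eq_false', decide_eq_true_eq]

theorem runMin_iff (xs : List Int) (k : Nat) (x c : Int) :
    runMin k x xs < c ↔
      ∃ i, i < ((k, x) :: keyedOf xs).length ∧ ¬ Cut ((k, x) :: keyedOf xs) 0 i ∧
        vA ((k, x) :: keyedOf xs) i < c := by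
  induction xs generalizing x with
  | nil =>
    simp only [runMin, keyedOf, List.map_nil, List.length_cons, List.length_nil]
    constructor
    · intro h
      exact ⟨0, by omega, by rintro ⟨m, hm, -, -⟩; omega, by simpa [vA_cons_zero] using h⟩
    · rintro ⟨i, hi, -, hlt⟩
      match i, hi with
      | 0, _ => simpa [vA_cons_zero] using hlt
  | cons y ys ih =>
    unfold runMin
    by_cases hk : pyPopcount y = k
    · rw [if_pos hk]
      rw [ih (min x y)]
      have hkey : keyedOf (y :: ys) = (k, y) :: keyedOf ys := by simp [keyedOf, hk]
      rw [hkey]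
      have hbs : ∀ i' : Nat, Cut ((k, x) :: (k, y) :: keyedOf ys) 0 (i' + 2) ↔
          Cut ((k, min x y) :: keyedOf ys) 0 (i' + 1) := by
        intro i'
        rw [show i' + 2 = (i' + 1) + 1 from rfl, cut_zero_succ]
        simp only [kA_cons_zero, ne_eq, not_true_eq_false, false_or]
        exact cut_head_val k y (min x y) (keyedOf ys) 0 (i' + 1)
      constructor
      · rintro ⟨i, hi, hcut, hlt⟩
        match i with
        | 0 =>
          simp only [vA_cons_zero] at hlt
          rcases min_lt_iff.mp hlt with h1 | h2
          · exact ⟨0, by simp, by rintro ⟨m, hm, -, -⟩; omega, by simpa [vA_cons_zero] using h1⟩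
          · refine ⟨1, by simp, ?_, by simpa [vA_cons_succ, vA_cons_zero] using h2⟩
            rintro ⟨m, hm, -, hne⟩
            have hm0 : m = 0 := by omega
            subst hm0
            exact hne (by simp [kA_cons_zero, kA_cons_succ])
        | i + 1 =>
          simp only [vA_cons_succ] at hlt
          refine ⟨i + 2, by simpa using hi, ?_, by simpa [vA_cons_succ] using hlt⟩
          intro hc
          exact hcut ((hbs i).mp hc)
      · rintro ⟨i, hi, hcut, hlt⟩
        match i with
        | 0 =>
          simp only [vA_cons_zero] at hlt
          exact ⟨0, by simp, by rintro ⟨m, hm, -, -⟩; omega,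
            by simp only [vA_cons_zero]; omega⟩
        | 1 =>
          simp only [vA_cons_succ, vA_cons_zero] at hlt
          exact ⟨0, by simp, by rintro ⟨m, hm, -, -⟩; omega,
            by simp only [vA_cons_zero]; omega⟩
        | i + 2 =>
          simp only [vA_cons_succ] at hlt
          refine ⟨i + 1, by simpa using hi, ?_, by simpa [vA_cons_succ] using hlt⟩
          intro hc
          exact hcut ((hbs i).mpr hc)
    · rw [if_neg hk]
      have hkey : keyedOf (y :: ys) = (pyPopcount y, y) :: keyedOf ys := by simp [keyedOf]
      rw [hkey]
      constructor
      · intro h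
        exact ⟨0, by simp, by rintro ⟨m, hm, -, -⟩; omega, by simpa [vA_cons_zero] using h⟩
      · rintro ⟨i, hi, hcut, hlt⟩
        match i with
        | 0 => simpa [vA_cons_zero] using hlt
        | i + 1 =>
          exfalso
          exact hcut ⟨0, by omega, by omega, by simp only [kA_cons_zero, kA_cons_succ]; exact Ne.symm hk⟩

theorem B_driver (l : List Int) (k : Nat) (lo hi : Int) :
    (chkAdj (mkRuns k lo hi l) = false ↔ GP false ((k, hi) :: keyedOf l)) := by
  induction l generalizing k lo hi with
  | nil =>
    simp only [mkRuns]
    constructor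
    · intro h
      exact absurd h (by simp [chkAdj])
    · rintro ⟨i, hi, j, hj, -⟩
      simp [keyedOf] at hi
      omega
  | cons x xs ih =>
    simp only [mkRuns]
    by_cases h : pyPopcount x = k
    · rw [if_pos h, ih,
        show keyedOf (x :: xs) = (k, x) :: keyedOf xs from by simp [keyedOf, h]]
      have h1 := GP_cons false (k, hi) ((k, x) :: keyedOf xs)
      have h2 := GP_cons false (k, x) (keyedOf xs)
      have h3 := HG_shift false k hi x (keyedOf xs)
      have h4 := HG_max false k hi x (keyedOf xs)
      have h5 := GP_cons false (k, max hi x) (keyedOf xs)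
      exact h5.trans ((or_congr h4.symm Iff.rfl).trans (or_assoc.trans
        ((or_congr h3.symm h2.symm).trans h1.symm)))
    · rw [if_neg h]
      rcases hm : mkRuns (pyPopcount x) x x xs with _ | ⟨s, t⟩
      · exact absurd hm (mkRuns_ne_nil xs (pyPopcount x) x x)
      · have hs1 : s.1 = runMin (pyPopcount x) x xs := by
          have := mkRuns_head_fst xs (pyPopcount x) x x
          rw [hm] at this
          simpa using this
        have hne : k ≠ pyPopcount x := fun he => h he.symm
        have hdiff := HG_diff false k (pyPopcount x) hi x (keyedOf xs) hne
        simp only [Bool.false_eq_true, false_implies, true_and] at hdiff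
        have hrestne : ((pyPopcount x, x) :: keyedOf xs) ≠ [] := by simp
        rw [chkAdj_cons, hs1, show ((lo, hi) : Int × Int).2 = hi from rfl, runMin_iff, ← hm, ih,
          show keyedOf (x :: xs) = (pyPopcount x, x) :: keyedOf xs from by simp [keyedOf]]
        have h1 := GP_cons false (k, hi) ((pyPopcount x, x) :: keyedOf xs)
        have h3 := chain_first_run ((pyPopcount x, x) :: keyedOf xs) hi hrestne
        exact h3.symm.trans ((or_congr hdiff.symm Iff.rfl).trans h1.symm)

theorem A_driver (l : List Int) (bc : Nat) (pm cm : Int) (hpm : -1 ≤ pm) :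
    (goA bc pm cm l = false ↔ PV pm ((bc, cm) :: keyedOf l)) := by
  induction l generalizing bc pm cm with
  | nil =>
    simp only [goA]
    constructor
    · intro h
      simp at h
    · intro h
      exfalso
      unfold PV PP GP at h
      rcases h with ⟨-, i, h1, hi, -⟩ | ⟨i, hi, j, hj, -⟩
      · simp only [keyedOf, List.map_nil, List.length_cons, List.length_nil] at hi
        omega
      · simp only [keyedOf, List.map_nil, List.length_cons, List.length_nil] at hi
        omega
  | cons x xs ih =>
    simp only [goA]
    by_cases hk : pyPopcount x = bc
    · rw [if_neg (by simp [hk])]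
      have hkey : keyedOf (x :: xs) = (bc, x) :: keyedOf xs := by simp [keyedOf, hk]
      rw [hkey]
      by_cases hc : pm ≠ -1 ∧ x < pm
      · rw [if_pos hc]
        have hpm0 : 0 ≤ pm := by rcases hc with ⟨h1, -⟩; omega
        unfold PV PP
        constructor
        · rintro -
          refine Or.inl ⟨hpm0, 1, le_refl 1, ?_, ?_⟩
          · simp only [List.length_cons]
            omega
          · exact hc.2
        · rintro -
          rfl
      · rw [if_neg hc, ih bc pm (max cm x) hpm]
        have hGP : GP true ((bc, cm) :: (bc, x) :: keyedOf xs) ↔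
            GP true ((bc, max cm x) :: keyedOf xs) := by
          have h1 := GP_cons true (bc, cm) ((bc, x) :: keyedOf xs)
          have h2 := GP_cons true (bc, x) (keyedOf xs)
          have h3 := HG_shift true bc cm x (keyedOf xs)
          have h4 := HG_max true bc cm x (keyedOf xs)
          have h5 := GP_cons true (bc, max cm x) (keyedOf xs)
          exact h1.trans ((or_congr h3 h2).trans (or_assoc.symm.trans
            ((or_congr h4 Iff.rfl).trans h5.symm)))
        have hPP : PP pm ((bc, cm) :: (bc, x) :: keyedOf xs) ↔
            PP pm ((bc, max cm x) :: keyedOf xs) := by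
          rw [PP_tail, PP_tail]
          constructor
          · rintro ⟨h0, i, hi, hlt⟩
            match i with
            | 0 =>
              exact absurd ⟨by omega, by simpa [vA_cons_zero] using hlt⟩ hc
            | i + 1 =>
              exact ⟨h0, i, by simpa using hi, by simpa [vA_cons_succ] using hlt⟩
          · rintro ⟨h0, i, hi, hlt⟩
            exact ⟨h0, i + 1, by simpa using hi, by simpa [vA_cons_succ] using hlt⟩
        unfold PV
        rw [hGP, hPP]

    · rw [if_pos hk]
      have hkey : keyedOf (x :: xs) = (pyPopcount x, x) :: keyedOf xs := by simp [keyedOf]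
      rw [hkey]
      have hnebc : bc ≠ pyPopcount x := fun he => hk he.symm
      have hcutone : Cut ((bc, cm) :: (pyPopcount x, x) :: keyedOf xs) 0 1 :=
        ⟨0, by omega, by omega, by simp only [kA_cons_zero, kA_cons_succ]; exact hnebc⟩
      by_cases hc : max pm cm ≠ -1 ∧ x < max pm cm
      · rw [if_pos hc]
        have h0 : 0 ≤ max pm cm := by rcases hc with ⟨h1, -⟩; omega
        unfold PV PP
        constructor
        · rintro -
          rcases max_choice pm cm with hmx | hmx
          · refine Or.inl ⟨by omega, 1, le_refl 1, ?_, ?_⟩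
            · simp only [List.length_cons]
              omega
            · show x < pm
              omega
          · refine Or.inr ⟨1, ?_, 0, by omega, hcutone, ?_, ?_⟩
            · simp only [List.length_cons]
              omega
            · rintro -
              show (0 : Int) ≤ cm
              omega
            · show x < cm
              omega
        · rintro -
          rfl
      · rw [if_neg hc, ih (pyPopcount x) (max pm cm) x (by omega)]
        have hkill : ∀ c : Int, 0 ≤ c → c ≤ max pm cm → ¬ x < c := by
          intro c h0 hle hx
          exact hc ⟨by omega, by omega⟩
        have hHG := HG_diff true bc (pyPopcount x) cm x (keyedOf xs) hnebc
        unfold PV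
        constructor
        · rintro (hPPs | hGPs)
          · rcases (PP_max pm cm _).mp hPPs with ⟨h0, i, h1, hi, hlt⟩ | ⟨h0, i, h1, hi, hlt⟩
            · exact Or.inl ((PP_tail pm _ _).mpr ⟨h0, i, hi, hlt⟩)
            · exact Or.inr ((GP_cons true _ _).mpr (Or.inl (hHG.mpr ⟨fun _ => h0, i, hi, hlt⟩)))
          · exact Or.inr ((GP_cons true _ _).mpr (Or.inr hGPs))
        · rintro (hPPb | hGPb)
          · rcases (PP_tail pm _ _).mp hPPb with ⟨h0, i, hi, hlt⟩
            match i with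
            | 0 =>
              have hx : x < pm := hlt
              exact absurd hx (hkill pm h0 (le_max_left pm cm))
            | i + 1 =>
              exact Or.inl ((PP_max pm cm _).mpr (Or.inl ⟨h0, i + 1, by omega, hi, hlt⟩))
          · rcases (GP_cons true _ _).mp hGPb with hH | hG
            · rcases hHG.mp hH with ⟨hs, i, hi, hlt⟩
              have h0cm : (0 : Int) ≤ cm := hs rfl
              match i with
              | 0 =>
                have hx : x < cm := hlt
                exact absurd hx (hkill cm h0cm (le_max_right pm cm))
              | i + 1 =>
                exact Or.inl ((PP_max pm cm _).mpr (Or.inr ⟨h0cm, i + 1, by omega, hi, hlt⟩))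
            · exact Or.inr hG

theorem kA_keyedOf (ar : List Int) (i : Nat) : kA (keyedOf ar) i = pyPopcount (ar.getD i 0) := by
  induction ar generalizing i with
  | nil => cases i <;> rfl
  | cons a t ih =>
    cases i with
    | zero => rfl
    | succ i => exact ih i

theorem vA_keyedOf (ar : List Int) (i : Nat) : vA (keyedOf ar) i = ar.getD i 0 := by
  induction ar generalizing i with
  | nil => cases i <;> rfl
  | cons a t ih =>
    cases i with
    | zero => rfl
    | succ i => exact ih i

theorem length_keyedOf (ar : List Int) : (keyedOf ar).length = ar.length := by
  simp [keyedOf]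

theorem getBang_eq_getD (ar : List Int) (i : Nat) : ar[i]! = ar.getD i 0 := by
  by_cases h : i < ar.length
  · rw [getElem!_pos ar i h, List.getD_eq_getElem ar 0 h]
  · rw [getElem!_neg ar i (by omega), List.getD_eq_default ar 0 (by omega)]
    rfl

theorem tail_getD (ar : List Int) (k : Nat) : ar.tail.getD k 0 = ar.getD (k + 1) 0 := by
  cases ar with
  | nil => rfl
  | cons a t => rfl

theorem VI_iff (ar : List Int) (s : Bool) : VI ar s ↔ ¬ List.IsChain LE.le ar ∧ ∃ k, k < ar.length - 1 ∧
    (pyPopcount (ar.getD k 0) ≠ pyPopcount (ar.getD (k + 1) 0) ∧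
     ((ar.drop (k + 1)).min?.getD 0 <
        (ar.take (k + 1)).foldl max ((ar.drop (k + 1)).min?.getD 0) ∧
      (s = true → 0 ≤ (ar.take (k + 1)).foldl max ((ar.drop (k + 1)).min?.getD 0)))) := by
  simp only [VI, getBang_eq_getD, tail_getD]

theorem le_foldl_max (l : List Int) (a : Int) : a ≤ l.foldl max a := by
  induction l generalizing a with
  | nil => simp
  | cons x xs ih => exact le_trans (le_max_left a x) (ih (max a x))

theorem foldl_max_of_mem (l : List Int) (a x : Int) (h : x ∈ l) : x ≤ l.foldl max a := by
  induction l generalizing a with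
  | nil => simp at h
  | cons y ys ih =>
    rcases List.mem_cons.mp h with rfl | h'
    · exact le_trans (le_max_right a x) (le_foldl_max ys (max a x))
    · exact ih (max a y) h'

theorem foldl_max_cases (l : List Int) (a : Int) : l.foldl max a = a ∨ l.foldl max a ∈ l := by
  induction l generalizing a with
  | nil => exact Or.inl rfl
  | cons y ys ih =>
    rcases ih (max a y) with h | h
    · rcases max_choice a y with hm | hm
      · exact Or.inl (by rw [List.foldl_cons, h, hm])
      · exact Or.inr (by rw [List.foldl_cons, h, hm]; exact List.mem_cons_self)
    · exact Or.inr (List.mem_cons_of_mem y h)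

theorem foldl_min_le (l : List Int) (a : Int) : l.foldl min a ≤ a := by
  induction l generalizing a with
  | nil => simp
  | cons x xs ih => exact le_trans (ih (min a x)) (min_le_left a x)

theorem foldl_min_of_mem (l : List Int) (a x : Int) (h : x ∈ l) : l.foldl min a ≤ x := by
  induction l generalizing a with
  | nil => simp at h
  | cons y ys ih =>
    rcases List.mem_cons.mp h with rfl | h'
    · exact le_trans (foldl_min_le ys (min a x)) (min_le_right a x)
    · exact ih (min a y) h'

theorem foldl_min_cases (l : List Int) (a : Int) : l.foldl min a = a ∨ l.foldl min a ∈ l := by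
  induction l generalizing a with
  | nil => exact Or.inl rfl
  | cons y ys ih =>
    rcases ih (min a y) with h | h
    · rcases min_choice a y with hm | hm
      · exact Or.inl (by rw [List.foldl_cons, h, hm])
      · exact Or.inr (by rw [List.foldl_cons, h, hm]; exact List.mem_cons_self)
    · exact Or.inr (List.mem_cons_of_mem y h)

theorem minD_le_of_mem (l : List Int) (x : Int) (h : x ∈ l) : l.min?.getD 0 ≤ x := by
  cases l with
  | nil => simp at h
  | cons a t =>
    have hrfl : ((a :: t).min?).getD 0 = t.foldl min a := rfl
    rw [hrfl]
    rcases List.mem_cons.mp h with rfl | h'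
    · exact foldl_min_le t x
    · exact foldl_min_of_mem t a x h'

theorem minD_mem (l : List Int) (h : l ≠ []) : l.min?.getD 0 ∈ l := by
  cases l with
  | nil => exact absurd rfl h
  | cons a t =>
    have hrfl : ((a :: t).min?).getD 0 = t.foldl min a := rfl
    rw [hrfl]
    rcases foldl_min_cases t a with hm | hm
    · rw [hm]; exact List.mem_cons_self
    · exact List.mem_cons_of_mem a hm

theorem mem_take_getD (ar : List Int) (k j : Nat) (hj : j ≤ k) (hjn : j < ar.length) :
    ar.getD j 0 ∈ ar.take (k + 1) := by
  have hjt : j < (ar.take (k + 1)).length := by rw [List.length_take]; omega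
  exact List.mem_iff_getElem.mpr ⟨j, hjt,
    by rw [List.getElem_take, ← List.getD_eq_getElem ar 0 hjn]⟩

theorem mem_drop_getD (ar : List Int) (k i : Nat) (hi : k + 1 ≤ i) (hin : i < ar.length) :
    ar.getD i 0 ∈ ar.drop (k + 1) := by
  have hit : i - (k + 1) < (ar.drop (k + 1)).length := by rw [List.length_drop]; omega
  refine List.mem_iff_getElem.mpr ⟨i - (k + 1), hit, ?_⟩
  rw [List.getElem_drop, List.getD_eq_getElem ar 0 hin]
  have hii : k + 1 + (i - (k + 1)) = i := by omega
  simp [hii]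

theorem take_elem_idx (ar : List Int) (k : Nat) (x : Int) (h : x ∈ ar.take (k + 1)) :
    ∃ j, j ≤ k ∧ j < ar.length ∧ ar.getD j 0 = x := by
  rcases List.mem_iff_getElem.mp h with ⟨j, hj, hv⟩
  rw [List.length_take] at hj
  rw [List.getElem_take] at hv
  exact ⟨j, by omega, by omega, by rw [List.getD_eq_getElem ar 0 (by omega)]; exact hv⟩

theorem drop_elem_idx (ar : List Int) (k : Nat) (x : Int) (h : x ∈ ar.drop (k + 1)) :
    ∃ i, k + 1 ≤ i ∧ i < ar.length ∧ ar.getD i 0 = x := by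
  rcases List.mem_iff_getElem.mp h with ⟨d, hd, hv⟩
  rw [List.length_drop] at hd
  rw [List.getElem_drop] at hv
  exact ⟨k + 1 + d, by omega, by omega,
    by rw [List.getD_eq_getElem ar 0 (by omega)]; exact hv⟩

theorem pair_not_chain (s : Bool) (ar : List Int) (h : GP s (keyedOf ar)) :
    ¬ List.IsChain LE.le ar := by
  intro hc
  rcases h with ⟨i, hi, j, hji, -, -, hlt⟩
  rw [length_keyedOf] at hi
  rw [vA_keyedOf, vA_keyedOf] at hlt
  have hp := List.isChain_iff_pairwise.mp hc
  have hji' := List.pairwise_iff_getElem.mp hp j i (by omega) (by omega) hji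
  rw [List.getD_eq_getElem ar 0 (by omega), List.getD_eq_getElem ar 0 (by omega)] at hlt
  omega

theorem GP_iff_VI (s : Bool) (ar : List Int) : GP s (keyedOf ar) ↔ VI ar s := by
  rw [VI_iff]
  constructor
  · intro hgp
    refine ⟨pair_not_chain s ar hgp, ?_⟩
    rcases hgp with ⟨i, hi, j, hji, ⟨k, hki, hjk, hne⟩, hs, hlt⟩
    rw [length_keyedOf] at hi
    rw [kA_keyedOf, kA_keyedOf] at hne
    rw [vA_keyedOf, vA_keyedOf] at hlt
    rw [vA_keyedOf] at hs
    have hmi : (ar.drop (k + 1)).min?.getD 0 ≤ ar.getD i 0 :=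
      minD_le_of_mem _ _ (mem_drop_getD ar k i (by omega) (by omega))
    have hjq : ar.getD j 0 ≤
        (ar.take (k + 1)).foldl max ((ar.drop (k + 1)).min?.getD 0) :=
      foldl_max_of_mem _ _ _ (mem_take_getD ar k j hjk (by omega))
    exact ⟨k, by omega, hne, by omega, fun hst => le_trans (hs hst) hjq⟩
  · rintro ⟨-, k, hk, hne, hmq, hsq⟩
    rcases foldl_max_cases (ar.take (k + 1)) ((ar.drop (k + 1)).min?.getD 0) with hq | hq
    · omega
    · rcases take_elem_idx ar k _ hq with ⟨j, hjk, hjn, hjv⟩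
      have hdne : ar.drop (k + 1) ≠ [] := by
        intro hnil
        have := congrArg List.length hnil
        rw [List.length_drop] at this
        simp at this
        omega
      rcases drop_elem_idx ar k _ (minD_mem _ hdne) with ⟨i, hik, hin, hiv⟩
      refine ⟨i, by rw [length_keyedOf]; omega, j, by omega,
        ⟨k, by omega, hjk, by rw [kA_keyedOf, kA_keyedOf]; exact hne⟩, ?_, ?_⟩
      · intro hst
        rw [vA_keyedOf, hjv]
        exact hsq hst
      · rw [vA_keyedOf, vA_keyedOf, hjv, hiv]
        omega

theorem A_false_iff (a : Int) (l : List Int) :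
    (findArrayCanBeSorted (a :: l) = false ↔ VI (a :: l) true) := by
  show goA (pyPopcount a) (-1) a l = false ↔ VI (a :: l) true
  rw [A_driver l (pyPopcount a) (-1) a (le_refl (-1))]
  have : ((pyPopcount a, a) :: keyedOf l) = keyedOf (a :: l) := rfl
  rw [this, ← GP_iff_VI]
  unfold PV PP
  constructor
  · rintro (⟨h0, -⟩ | h)
    · omega
    · exact h
  · exact Or.inr

theorem B_false_iff (a : Int) (l : List Int) :
    (findArrayCanBeSorted_alt (a :: l) = false ↔ VI (a :: l) false) := by
  show chkAdj (flushB (List.foldl stepB (stepB ([], none) a) l)) = false ↔ VI (a :: l) false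
  have h1 : stepB ([], none) a = ([], some (pyPopcount a, a, a)) := rfl
  rw [h1, foldB_flush, List.nil_append, B_driver]
  have : ((pyPopcount a, a) :: keyedOf l) = keyedOf (a :: l) := rfl
  rw [this, GP_iff_VI]

theorem VI_mono (ar : List Int) : VI ar true → VI ar false := by
  rw [VI_iff, VI_iff]
  rintro ⟨hc, k, hk, hne, hmq, -⟩
  exact ⟨hc, k, hk, hne, hmq, by simp⟩

-- ===== VERDICT (by name: the statement is the Claim_ definition above) =====
theorem findArrayCanBeSorted_spec : Claim_unchanged_findArrayCanBeSorted := by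
  intro ar hdom hpre
  unfold Spec_findArrayCanBeSorted
  intro hnd
  match ar with
  | [] => exact absurd rfl hpre
  | a :: l =>
    by_cases hva : VI (a :: l) true
    · rw [(A_false_iff a l).mpr hva, (B_false_iff a l).mpr (VI_mono _ hva)]
    · have hvb : ¬ VI (a :: l) false := by
        intro hvb
        exact hnd (by unfold D_findArrayCanBeSorted; exact ⟨hvb, hva⟩)
      have hA : findArrayCanBeSorted (a :: l) = true := by
        cases hA' : findArrayCanBeSorted (a :: l) with
        | true => rfl
        | false => exact absurd ((A_false_iff a l).mp hA') hva
      have hB : findArrayCanBeSorted_alt (a :: l) = true := by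
        cases hB' : findArrayCanBeSorted_alt (a :: l) with
        | true => rfl
        | false => exact absurd ((B_false_iff a l).mp hB') hvb
      rw [hA, hB]

theorem findArrayCanBeSorted_changed : Claim_changed_findArrayCanBeSorted := by
  unfold Claim_changed_findArrayCanBeSorted; decide

theorem findArrayCanBeSorted_tight : Claim_exact_findArrayCanBeSorted := by
  intro ar hdom hpre hd
  unfold D_findArrayCanBeSorted at hd
  rcases hd with ⟨hvb, hva⟩
  match ar with
  | [] => exact absurd rfl hpre
  | a :: l =>
    have hA : findArrayCanBeSorted (a :: l) = true := by
      cases hA' : findArrayCanBeSorted (a :: l) with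
      | true => rfl
      | false => exact absurd ((A_false_iff a l).mp hA') hva
    have hB : findArrayCanBeSorted_alt (a :: l) = false := (B_false_iff a l).mpr hvb
    rw [hA, hB]
    simp
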